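-- pv_equiv track=rewrite | github.com/garyz712/LCKiller | equalizeBandwidth.py | equalizeBandwidth2
-- ===== SOURCE A (Python) =====
-- def equalizeBandwidth2(servers):
--     # Base case: if all servers have the same bandwidth
--     if len(set(servers)) == 1:
--         return 0
--
--     max_bw = max(servers)
--     total_diff = sum(max_bw - bw for bw in servers)
--
--     # If we only use +1 upgrades on odd hours
--     right = total_diff * 2
--     # Binary search for the minimum hours needed
--     left = 0
--
--
--     while left < right:
--         mid = (left + right) // 2
--         if is_possible(servers, mid):
--             right = mid
--         else:
--             left = mid + 1
--
--     return left
--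
-- def is_possible(servers, hours):
--     # Calculate how many upgrades of each type we have
--     light_upgrades = (hours + 1) // 2  # Odd hours (+1 Mbps)
--     heavy_upgrades = hours // 2        # Even hours (+2 Mbps)
--
--     # Calculate the maximum bandwidth we can reach
--     target = max(servers)
--
--     # Calculate how much each server needs to increase
--     # to match the target bandwidth
--     differences = [target - server for server in servers]
--
--     # Sort differences in descending order (greedy approach)
--     differences.sort(reverse=True)
--
--     # Try to satisfy each server's needs
--     for diff in differences:
--         if diff == 0:
--             continue  # Skip servers already at target
--
--         # Use heavy upgrades first (more efficient)
--         h_used = min(diff // 2, heavy_upgrades)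
--         diff -= h_used * 2
--         heavy_upgrades -= h_used
--
--         # Use light upgrades for remainder
--         l_used = min(diff, light_upgrades)
--         diff -= l_used
--         light_upgrades -= l_used
--
--         # If we couldn't fully upgrade this server, return False
--         if diff > 0:
--             return False
--
--     return True
-- ===== SOURCE B (Python) =====
-- def equalizeBandwidth2(servers):
--     # O(n) closed form: with t hours we get L=(t+1)//2 light (+1) and H=t//2 heavy (+2)
--     # upgrades; feasibility <=> T <= L + 2*min(H, S) where T = sum of deficits and
--     # S = sum of deficit//2.  Invert that monotone condition directly.
--     m = max(servers)
--     T = sum(m - x for x in servers)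
--     if T == 0:
--         return 0
--     S = sum((m - x) // 2 for x in servers)
--     if T <= 3 * S:
--         return 2 * (T // 3) + T % 3
--     return 2 * (T - 2 * S) - 1
-- ===== Notes on version B (the rewrite author's own statement) =====
-- stated objective: faster
-- what changed: Replaces A's binary search (each step re-sorting and greedily scanning all servers) by a single O(n) pass computing total deficit T and sum of half-deficits S, then an O(1) closed-form inversion of the monotone feasibility condition T <= (t+1)//2 + 2*min(t//2, S).
-- outside the precondition, e.g. on equalizeBandwidth2([]): A raises ValueError, B raises ValueError
import Mathlib
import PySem

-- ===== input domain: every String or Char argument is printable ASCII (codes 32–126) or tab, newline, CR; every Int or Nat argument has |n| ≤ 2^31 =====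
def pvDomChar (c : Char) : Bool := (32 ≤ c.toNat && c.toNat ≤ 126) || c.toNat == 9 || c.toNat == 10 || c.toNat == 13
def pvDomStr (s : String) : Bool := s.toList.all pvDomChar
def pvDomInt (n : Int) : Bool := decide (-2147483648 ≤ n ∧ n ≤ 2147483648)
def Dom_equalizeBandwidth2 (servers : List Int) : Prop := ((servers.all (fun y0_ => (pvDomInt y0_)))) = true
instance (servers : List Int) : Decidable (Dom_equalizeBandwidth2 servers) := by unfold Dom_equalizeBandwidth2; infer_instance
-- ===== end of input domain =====

-- B replaces A's binary search over a greedy feasibility check by a single-pass O(n)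
-- closed-form computation (objective: faster, asymptotic).

-- ===== PORT A =====

-- the for-loop inside is_possible, over the sorted differences, state (heavy, light)
def pvIsPossibleLoop (diffs : List Int) (heavy light : Int) : Bool :=
  match diffs with
  | [] => true
  | d :: rest =>
    if d = 0 then pvIsPossibleLoop rest heavy light
    else
      let hUsed := min (PySem.Int.floordiv d 2) heavy
      let d1 := d - hUsed * 2
      let heavy' := heavy - hUsed
      let lUsed := min d1 light
      let d2 := d1 - lUsed
      let light' := light - lUsed
      if d2 > 0 then false
      else pvIsPossibleLoop rest heavy' light'

def pvIsPossible (servers : List Int) (hours : Int) : Bool :=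
  let light := PySem.Int.floordiv (hours + 1) 2
  let heavy := PySem.Int.floordiv hours 2
  let target := (PySem.List.max? servers (fun x => x)).getD 0
  let differences := servers.map (fun s => target - s)
  let diffsSorted := PySem.List.sorted differences (fun x => x) true
  pvIsPossibleLoop diffsSorted heavy light

-- the while-loop: binary search on [left, right)
def pvBSearch (servers : List Int) (left right : Int) : Int :=
  if h : left < right then
    let mid := PySem.Int.floordiv (left + right) 2
    if pvIsPossible servers mid then pvBSearch servers left mid
    else pvBSearch servers (mid + 1) right
  else left
termination_by (right - left).toNat
decreasing_by
  · have h2 := (PySem.Int.floordiv_lt_iff_lt_mul (a := left + right) (q := right)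
      (by norm_num : (0:Int) < 2)).mpr (by omega)
    omega
  · have h1 := PySem.Int.floordiv_two_mid_bounds (le_of_lt h)
    omega

def equalizeBandwidth2 (servers : List Int) : Int :=
  if PySem.Set.len (PySem.Set.ofList servers) = 1 then 0
  else
    let maxBw := (PySem.List.max? servers (fun x => x)).getD 0
    let totalDiff := (servers.map (fun bw => maxBw - bw)).sum
    let right := totalDiff * 2
    pvBSearch servers 0 right

-- ===== PORT B =====

def equalizeBandwidth2_alt (servers : List Int) : Int :=
  let m := (PySem.List.max? servers (fun x => x)).getD 0
  let T := (servers.map (fun x => m - x)).sum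
  if T = 0 then 0
  else
    let S := (servers.map (fun x => PySem.Int.floordiv (m - x) 2)).sum
    if T ≤ 3 * S then 2 * PySem.Int.floordiv T 3 + PySem.Int.mod T 3
    else 2 * (T - 2 * S) - 1

-- ===== PRECONDITION & SPEC =====
-- Pre_ excludes only the empty list, on which A's max(servers) raises ValueError.
def Pre_equalizeBandwidth2 (servers : List Int) : Prop := servers ≠ []
instance (servers : List Int) : Decidable (Pre_equalizeBandwidth2 servers) := by
  unfold Pre_equalizeBandwidth2; infer_instance
def pvWitness_equalizeBandwidth2 : List Int := [3, 1, 2]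

def Spec_equalizeBandwidth2 (servers : List Int) (out : Int) : Prop := out = equalizeBandwidth2_alt servers
instance (servers : List Int) (out : Int) : Decidable (Spec_equalizeBandwidth2 servers out) := by unfold Spec_equalizeBandwidth2; infer_instance

-- ===== CLAIM (what is proved, stated in full; the proofs are below) =====
def Claim_equal_equalizeBandwidth2 : Prop := ∀ (servers : List Int), Dom_equalizeBandwidth2 servers → Pre_equalizeBandwidth2 servers → Spec_equalizeBandwidth2 servers (equalizeBandwidth2 servers)

-- ===== LEMMAS AND PROOFS =====

-- sums of a nonnegative list
theorem pv_sum_nonneg (ds : List Int) (h : ∀ d ∈ ds, 0 ≤ d) : 0 ≤ ds.sum := by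
  induction ds with
  | nil => simp
  | cons d rest ih =>
    have := h d (by simp)
    have := ih (fun x hx => h x (by simp [hx]))
    simp only [List.sum_cons]; omega

theorem pv_halfsum_nonneg (ds : List Int) (h : ∀ d ∈ ds, 0 ≤ d) :
    0 ≤ (ds.map (fun d => d / 2)).sum := by
  induction ds with
  | nil => simp
  | cons d rest ih =>
    have := h d (by simp)
    have := ih (fun x hx => h x (by simp [hx]))
    simp only [List.map_cons, List.sum_cons]; omega

theorem pv_halfsum_le (ds : List Int) (h : ∀ d ∈ ds, 0 ≤ d) :
    2 * (ds.map (fun d => d / 2)).sum ≤ ds.sum := by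
  induction ds with
  | nil => simp
  | cons d rest ih =>
    have := h d (by simp)
    have := ih (fun x hx => h x (by simp [hx]))
    simp only [List.map_cons, List.sum_cons]; omega

-- the greedy loop is exactly the aggregate feasibility test
theorem pv_loop_char (ds : List Int) :
    ∀ heavy light : Int, (∀ d ∈ ds, 0 ≤ d) → 0 ≤ heavy → 0 ≤ light →
    pvIsPossibleLoop ds heavy light =
      decide (ds.sum ≤ light + 2 * min heavy ((ds.map (fun d => d / 2)).sum)) := by
  induction ds with
  | nil => intro heavy light _ hh hl; simp [pvIsPossibleLoop]; omega
  | cons d rest ih =>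
    intro heavy light hnn hh hl
    have hd : 0 ≤ d := hnn d (by simp)
    have hrest : ∀ x ∈ rest, 0 ≤ x := fun x hx => hnn x (by simp [hx])
    have hs0 := pv_sum_nonneg rest hrest
    have hs1 := pv_halfsum_nonneg rest hrest
    have hs2 := pv_halfsum_le rest hrest
    rw [show pvIsPossibleLoop (d :: rest) heavy light =
      (if d = 0 then pvIsPossibleLoop rest heavy light
       else
        let hUsed := min (PySem.Int.floordiv d 2) heavy
        let d1 := d - hUsed * 2
        let heavy' := heavy - hUsed
        let lUsed := min d1 light
        let d2 := d1 - lUsed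
        let light' := light - lUsed
        if d2 > 0 then false
        else pvIsPossibleLoop rest heavy' light') from rfl]
    rw [PySem.Int.floordiv_eq_ediv_of_pos (by norm_num)]
    by_cases h0 : d = 0
    · subst h0
      rw [if_pos rfl, ih heavy light hrest hh hl]
      simp only [List.sum_cons, List.map_cons, decide_eq_decide]
      norm_num
    · rw [if_neg h0]
      simp only []
      by_cases hfail : d - (min (d / 2) heavy) * 2 - min (d - (min (d / 2) heavy) * 2) light > 0
      · rw [if_pos hfail]
        symm
        rw [decide_eq_false_iff_not]
        simp only [List.sum_cons, List.map_cons]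
        omega
      · rw [if_neg hfail]
        rw [ih _ _ hrest (by omega) (by omega)]
        simp only [List.sum_cons, List.map_cons]
        have : (rest.sum ≤ light - min (d - min (d / 2) heavy * 2) light +
                  2 * min (heavy - min (d / 2) heavy) ((rest.map (fun d => d / 2)).sum)) ↔
               (d + rest.sum ≤ light + 2 * min heavy (d / 2 + (rest.map (fun d => d / 2)).sum)) := by
          omega
        simp only [decide_eq_decide]
        exact this

-- pvIsPossible in closed form (nonempty servers, max m)
theorem pv_isPossible_char (servers : List Int) (m : Int) (t : Int)
    (hm : PySem.List.max? servers (fun x => x) = some m) (ht : 0 ≤ t) :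
    pvIsPossible servers t =
      decide ((servers.map (fun x => m - x)).sum ≤
        PySem.Int.floordiv (t + 1) 2 +
          2 * min (PySem.Int.floordiv t 2) ((servers.map (fun x => (m - x) / 2)).sum)) := by
  have hmax := PySem.List.max?_isMax hm
  unfold pvIsPossible
  rw [hm]
  simp only [Option.getD_some]
  set ds := servers.map (fun s => m - s) with hds
  have hnn : ∀ d ∈ PySem.List.sorted ds (fun x => x) true, 0 ≤ d := by
    intro d hd
    have : d ∈ ds := ((PySem.List.sorted_perm ds (fun x => x) true).mem_iff).mp hd
    obtain ⟨s, hs, rfl⟩ := List.mem_map.mp this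
    have := hmax s hs
    omega
  rw [pv_loop_char _ _ _ hnn (by
        rw [PySem.Int.floordiv_eq_ediv_of_pos (by norm_num)]; omega)
      (by rw [PySem.Int.floordiv_eq_ediv_of_pos (by norm_num)]; omega)]
  have hperm : (PySem.List.sorted ds (fun x => x) true).Perm ds :=
    PySem.List.sorted_perm ds (fun x => x) true
  rw [hperm.sum_eq, (hperm.map (fun d => d / 2)).sum_eq]
  simp only [hds, List.map_map, Function.comp_def]

-- the binary search returns the threshold of a monotone predicate
theorem pv_bsearch_eq (servers : List Int) (a : Int)
    (hchar : ∀ t, 0 ≤ t → (pvIsPossible servers t = true ↔ a ≤ t)) :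
    ∀ n left right : Int, (right - left) ≤ n → 0 ≤ left → left ≤ a → a ≤ right →
    pvBSearch servers left right = a := by
  intro n
  induction n using Int.induction_on with
  | zero =>
    intro left right hn h0 hla har
    rw [pvBSearch, dif_neg (by omega)]
    omega
  | succ k ih =>
    intro left right hn h0 hla har
    by_cases hlt : left < right
    · rw [pvBSearch, dif_pos hlt]
      have hb := PySem.Int.floordiv_two_mid_bounds (le_of_lt hlt)
      have hb2 := (PySem.Int.floordiv_lt_iff_lt_mul (a := left + right) (q := right)
        (by norm_num : (0:Int) < 2)).mpr (by omega)
      set mid := PySem.Int.floordiv (left + right) 2 with hmid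
      by_cases hp : pvIsPossible servers mid = true
      · rw [if_pos hp]
        exact ih left mid (by omega) h0 hla ((hchar mid (by omega)).mp hp)
      · rw [if_neg hp]
        have hma : ¬ a ≤ mid := fun hle => hp ((hchar mid (by omega)).mpr hle)
        exact ih (mid + 1) right (by omega) (by omega) (by omega) har
    · rw [pvBSearch, dif_neg hlt]
      omega
  | pred k ih =>
    intro left right hn h0 hla har
    rw [pvBSearch, dif_neg (by omega)]
    omega

-- sums of nonnegatives: zero sum forces all zero
theorem pv_sum_zero (ds : List Int) (h : ∀ d ∈ ds, 0 ≤ d) (hz : ds.sum = 0) :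
    ∀ d ∈ ds, d = 0 := by
  induction ds with
  | nil => simp
  | cons d rest ih =>
    have hd := h d (by simp)
    have hrest : ∀ x ∈ rest, 0 ≤ x := fun x hx => h x (by simp [hx])
    have hs := pv_sum_nonneg rest hrest
    simp only [List.sum_cons] at hz
    intro x hx
    rcases List.mem_cons.mp hx with rfl | hx'
    · omega
    · exact ih hrest (by omega) x hx'

-- a constant nonempty list has a one-element set
theorem pv_ofList_const (xs : List Int) (x : Int) (hne : xs ≠ [])
    (h : ∀ y ∈ xs, y = x) : PySem.Set.ofList xs = [x] := by
  induction xs with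
  | nil => exact absurd rfl hne
  | cons z rest ih =>
    have hz := h z (by simp)
    subst hz
    rw [PySem.Set.ofList_cons]
    by_cases hr : rest = []
    · subst hr; rfl
    · rw [ih hr (fun y hy => h y (by simp [hy]))]
      show z :: PySem.Set.discard [z] z = [z]
      simp [PySem.Set.discard]

-- ===== VERDICT (by name: the statement is the Claim_ definition above) =====
theorem equalizeBandwidth2_spec : Claim_equal_equalizeBandwidth2 := by
  intro servers _ hpre
  unfold Spec_equalizeBandwidth2
  obtain ⟨m, hm⟩ : ∃ m, PySem.List.max? servers (fun x => x) = some m := by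
    cases hmx : PySem.List.max? servers (fun x => x) with
    | none => exact absurd ((PySem.List.max?_eq_none_iff _ _).mp hmx) hpre
    | some m => exact ⟨m, rfl⟩
  have hmax := PySem.List.max?_isMax hm
  have hmem := PySem.List.max?_mem hm
  have hnn : ∀ d ∈ servers.map (fun x => m - x), 0 ≤ d := by
    intro d hd
    obtain ⟨s, hs, rfl⟩ := List.mem_map.mp hd
    have := hmax s hs
    omega
  set T := (servers.map (fun x => m - x)).sum with hT
  set S := (servers.map (fun x => (m - x) / 2)).sum with hS
  have hT0 : 0 ≤ T := pv_sum_nonneg _ hnn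
  have hS0 : 0 ≤ S := by
    have := pv_halfsum_nonneg (servers.map (fun x => m - x)) hnn
    simpa [List.map_map, Function.comp_def, hS] using this
  have hS2 : 2 * S ≤ T := by
    have := pv_halfsum_le (servers.map (fun x => m - x)) hnn
    simpa [List.map_map, Function.comp_def, hS, hT] using this
  have hSfd : (servers.map (fun x => PySem.Int.floordiv (m - x) 2)).sum = S := by
    rw [hS]
    congr 1
    exact List.map_congr_left (fun x _ =>
      PySem.Int.floordiv_eq_ediv_of_pos (by norm_num))
  -- the two set/eq-zero cases coincide
  have hset : PySem.Set.len (PySem.Set.ofList servers) = 1 ↔ T = 0 := by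
    constructor
    · intro h1
      have hall : ∀ y ∈ servers, y = m := by
        intro y hy
        by_contra hne
        have hylt : y < m := lt_of_le_of_ne (hmax y hy) hne
        -- both y and m are distinct members of the set, so len ≥ 2
        have hyS : y ∈ PySem.Set.ofList servers := (PySem.Set.mem_ofList servers y).mpr hy
        have hmS : m ∈ PySem.Set.ofList servers := (PySem.Set.mem_ofList servers m).mpr hmem
        rcases hlen : PySem.Set.ofList servers with _ | ⟨z, zs⟩
        · simp [hlen] at hyS
        · have : PySem.Set.len (z :: zs) = 1 := hlen ▸ h1
          have hzs : zs = [] := by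
            simp [PySem.Set.len] at this
            omega
          subst hzs
          rw [hlen] at hyS hmS
          simp at hyS hmS
          omega
      rw [hT]
      have : servers.map (fun x => m - x) = servers.map (fun _ => (0:Int)) :=
        List.map_congr_left (fun x hx => by rw [hall x hx]; ring)
      rw [this]
      simp
    · intro hTz
      have hall : ∀ y ∈ servers, y = m := by
        intro y hy
        have := pv_sum_zero _ hnn (hT ▸ hTz) (m - y) (List.mem_map.mpr ⟨y, hy, rfl⟩)
        omega
      rw [pv_ofList_const servers m hpre hall]
      rfl
  unfold equalizeBandwidth2 equalizeBandwidth2_alt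
  rw [hm]
  simp only [Option.getD_some, ← hT, hSfd]
  by_cases hz : T = 0
  · rw [if_pos (hset.mpr hz), if_pos hz]
  · rw [if_neg (fun h => hz (hset.mp h)), if_neg hz]
    -- the closed-form answer
    set a : Int := if T ≤ 3 * S then 2 * PySem.Int.floordiv T 3 + PySem.Int.mod T 3
      else 2 * (T - 2 * S) - 1 with ha
    have ha' : a = if T ≤ 3 * S then 2 * (T / 3) + T % 3 else 2 * (T - 2 * S) - 1 := by
      rw [ha, PySem.Int.floordiv_eq_ediv_of_pos (by norm_num),
        PySem.Int.mod_eq_emod_of_pos (by norm_num)]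
    have hchar : ∀ t, 0 ≤ t → (pvIsPossible servers t = true ↔ a ≤ t) := by
      intro t ht
      rw [pv_isPossible_char servers m t hm ht,
        PySem.Int.floordiv_eq_ediv_of_pos (by norm_num),
        PySem.Int.floordiv_eq_ediv_of_pos (by norm_num), ← hT, ← hS]
      rw [decide_eq_true_iff]
      rw [ha']
      split_ifs with hcase <;> omega
    have hbounds : 0 ≤ a ∧ a ≤ T * 2 := by
      rw [ha']; split_ifs with hcase <;> omega
    exact pv_bsearch_eq servers a hchar (T * 2) 0 (T * 2) (by omega) le_rfl hbounds.1 hbounds.2
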